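-- pv_equiv track=rewrite | github.com/h-spear/problem-solving-python | programmers/level1/secret_map.py | solution
-- ===== SOURCE A (Python) =====
-- def solution(n, arr1, arr2):
--     answer = []
--     for i in range(n):
--         union = arr1[i] | arr2[i]
--         tmp = []
--         for _ in range(n):
--             tmp.append("#" if union & 1 else " ")
--             union >>= 1
--         answer.append("".join(reversed(tmp)))
--     return answer
-- ===== SOURCE B (Python) =====
-- def solution(n, arr1, arr2):
--     return [format((arr1[i] | arr2[i]) % (1 << n), f'0{n}b').replace('1', '#').replace('0', ' ')
--             for i in range(n)]
-- ===== Notes on version B (the rewrite author's own statement) =====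
-- stated objective: idiomatic
-- what changed: Replaces the per-bit inner loop (mask low bit, shift, reverse, join) by a single list comprehension that renders each row with format(row % (1 << n), f'0{n}b') and two str.replace calls; Pre_ excludes only inputs where A raises IndexError (n exceeding a list length).
import Mathlib
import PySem

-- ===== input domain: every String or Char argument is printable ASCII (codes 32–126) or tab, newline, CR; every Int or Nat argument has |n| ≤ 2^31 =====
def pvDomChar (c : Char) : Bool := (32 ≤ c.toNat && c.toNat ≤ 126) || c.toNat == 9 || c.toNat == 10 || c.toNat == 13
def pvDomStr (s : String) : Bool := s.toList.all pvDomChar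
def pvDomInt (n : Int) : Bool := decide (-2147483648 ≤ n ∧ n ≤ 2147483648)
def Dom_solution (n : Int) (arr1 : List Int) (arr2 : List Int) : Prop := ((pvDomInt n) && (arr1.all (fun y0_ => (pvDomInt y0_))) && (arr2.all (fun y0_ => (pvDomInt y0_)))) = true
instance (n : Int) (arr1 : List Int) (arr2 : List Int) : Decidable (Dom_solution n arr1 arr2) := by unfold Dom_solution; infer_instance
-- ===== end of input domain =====

-- B renders each row with binary formatting + replace instead of A's per-bit loop; objective: idiomatic.

-- ===== PORT A =====
-- inner loop 'for _ in range(n): tmp.append("#" if union & 1 else " "); union >>= 1' (fuel = n)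
def pvInnerA : Nat → Int → List String → List String
  | 0, _, tmp => tmp
  | k+1, u, tmp => pvInnerA k (u >>> (1:Nat)) (tmp ++ [if PySem.Int.band u 1 ≠ 0 then "#" else " "])

def solution (n : Int) (arr1 : List Int) (arr2 : List Int) : List String :=
  (PySem.List.pyRange 0 n 1).foldl (fun answer i =>
    answer ++ [PySem.Str.join ""
      (pvInnerA n.toNat
        (PySem.Int.bor (PySem.List.pyGetD arr1 i 0) (PySem.List.pyGetD arr2 i 0)) []).reverse]) []

-- ===== PORT B =====
-- hand port of format(v, f'0{w}b') for v ≥ 0: binary digits of v, MSB first ([] for v = 0),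
-- left-padded with '0' to width w; exact for the inputs reached (inside the loop w = n ≥ 1, so
-- format's width-0 rendering of 0 as '0' is never hit)
def pvBinDigits : Nat → List Char
  | 0 => []
  | v+1 => pvBinDigits ((v+1)/2) ++ [if (v+1) % 2 = 1 then '1' else '0']
decreasing_by exact Nat.div_lt_self (Nat.succ_pos v) (by omega)

def pvFormatBin (w v : Nat) : List Char :=
  List.replicate (w - (pvBinDigits v).length) '0' ++ pvBinDigits v

def solution_alt (n : Int) (arr1 : List Int) (arr2 : List Int) : List String :=
  (PySem.List.pyRange 0 n 1).map (fun i =>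
    PySem.Str.replace (PySem.Str.replace
      (String.ofList (pvFormatBin n.toNat
        (PySem.Int.mod
          (PySem.Int.bor (PySem.List.pyGetD arr1 i 0) (PySem.List.pyGetD arr2 i 0))
          ((1:Int) <<< n.toNat)).toNat))
      "1" "#") "0" " ")

-- ===== PRECONDITION & SPEC =====
-- Pre_ excludes exactly the inputs where A raises IndexError: n larger than a list's length.
def Pre_solution (n : Int) (arr1 : List Int) (arr2 : List Int) : Prop :=
  n ≤ (arr1.length : Int) ∧ n ≤ (arr2.length : Int)
instance (n : Int) (arr1 : List Int) (arr2 : List Int) : Decidable (Pre_solution n arr1 arr2) := by unfold Pre_solution; infer_instance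

def pvWitness_solution : Int × List Int × List Int := (2, ([9, 20], [30, 1]))

def Spec_solution (n : Int) (arr1 : List Int) (arr2 : List Int) (out : List String) : Prop := out = solution_alt n arr1 arr2
instance (n : Int) (arr1 : List Int) (arr2 : List Int) (out : List String) : Decidable (Spec_solution n arr1 arr2 out) := by unfold Spec_solution; infer_instance

-- ===== CLAIM (what is proved, stated in full; the proofs are below) =====
def Claim_equal_solution : Prop := ∀ (n : Int) (arr1 : List Int) (arr2 : List Int), Dom_solution n arr1 arr2 → Pre_solution n arr1 arr2 → Spec_solution n arr1 arr2 (solution n arr1 arr2)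

-- ===== LEMMAS AND PROOFS =====

-- the chars A's inner loop emits, LSB first
def pvBits : Nat → Int → List Char
  | 0, _ => []
  | k+1, u => (if PySem.Int.band u 1 ≠ 0 then '#' else ' ') :: pvBits k (u >>> (1:Nat))

lemma pvInnerA_eq (k : Nat) : ∀ (u : Int) (tmp : List String),
    pvInnerA k u tmp = tmp ++ (pvBits k u).map (fun c => String.ofList [c]) := by
  induction k with
  | zero => intro u tmp; simp [pvInnerA, pvBits]
  | succ k ih =>
    intro u tmp
    simp only [pvInnerA, pvBits, ih, List.map_cons, List.append_assoc]
    by_cases h : PySem.Int.band u 1 = 0 <;> simp [h]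

lemma replace_go_single (c d : Char) : ∀ (fuel : Nat) (l acc : List Char), l.length ≤ fuel →
    PySem.Chars.replace.go [c] [d] fuel l acc
      = acc.reverse ++ l.map (fun x => if x = c then d else x) := by
  intro fuel
  induction fuel with
  | zero =>
    intro l acc h
    have : l = [] := List.eq_nil_of_length_eq_zero (Nat.le_zero.mp h)
    subst this; simp [PySem.Chars.replace.go]
  | succ fuel ih =>
    intro l acc h
    cases l with
    | nil => simp [PySem.Chars.replace.go]
    | cons x t =>
      have ht : t.length ≤ fuel := by simpa using h
      by_cases hx : x = c
      · subst hx
        have hpre : [x].isPrefixOf (x :: t) = true := by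
          simp [List.isPrefixOf]
        simp only [PySem.Chars.replace.go, hpre, if_true, List.length_singleton,
          List.drop_succ_cons, List.drop_zero, ih t _ ht, List.map_cons]
        simp
      · have hpre : [c].isPrefixOf (x :: t) = false := by
          simp [List.isPrefixOf, Ne.symm hx]
        simp only [PySem.Chars.replace.go, hpre, Bool.false_eq_true, if_false,
          ih t _ ht, List.map_cons, if_neg hx]
        simp
lemma replace_single (cs : List Char) (c d : Char) :
    PySem.Chars.replace cs [c] [d] = cs.map (fun x => if x = c then d else x) := by
  rw [PySem.Chars.replace]
  simp only [List.isEmpty_cons, if_false, Bool.false_eq_true]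
  simpa using replace_go_single c d cs.length cs [] le_rfl

lemma fmt_step (k m : Nat) :
    pvFormatBin (k+1) m = pvFormatBin k (m/2) ++ [if m % 2 = 1 then '1' else '0'] := by
  cases m with
  | zero => simp [pvFormatBin, pvBinDigits, List.replicate_succ']
  | succ v =>
    rw [pvFormatBin, pvFormatBin, pvBinDigits]
    simp only [List.length_append, List.length_singleton]
    rw [show k + 1 - ((pvBinDigits ((v+1)/2)).length + 1) = k - (pvBinDigits ((v+1)/2)).length by omega]
    simp [List.append_assoc]

lemma emod_two_mul_ediv_two (u M : Int) (hM : 0 < M) :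
    (u % (M * 2)) / 2 = (u / 2) % M := by
  have h2M : (M * 2) ≠ 0 := by positivity
  have hdecomp : u = u % (M * 2) + (M * 2) * (u / (M * 2)) := by
    have := Int.mul_ediv_add_emod u (M * 2); omega
  set r := u % (M * 2) with hr
  have hr0 : 0 ≤ r := Int.emod_nonneg u h2M
  have hrlt : r < M * 2 := Int.emod_lt_of_pos u (by positivity)
  have hu2 : u / 2 = r / 2 + M * (u / (M * 2)) := by
    conv_lhs => rw [hdecomp]
    rw [show r + M * 2 * (u / (M * 2)) = r + (M * (u / (M * 2))) * 2 by ring]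
    rw [Int.add_mul_ediv_right _ _ (by norm_num)]
  rw [hu2, Int.add_mul_emod_self_left]
  exact (Int.emod_eq_of_lt (by omega) (by omega)).symm

-- '1'→'#' then '0'→' '  composed
lemma bits_eq (k : Nat) : ∀ (u : Int),
    (pvBits k u).reverse
      = (pvFormatBin k (PySem.Int.mod u ((2:Int)^k)).toNat).map
          (fun x => if x = '1' then '#' else if x = '0' then ' ' else x) := by
  induction k with
  | zero =>
    intro u
    simp [pvBits, pvFormatBin, PySem.Int.mod, pvBinDigits]
  | succ k ih =>
    intro u
    have hMpos : (0:Int) < 2^k := by positivity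
    have hpos : (0:Int) < 2^(k+1) := by positivity
    have hmodeq : PySem.Int.mod u ((2:Int)^(k+1)) = u % ((2:Int)^k * 2) := by
      rw [PySem.Int.mod_eq_emod_of_pos hpos, pow_succ]
    set m : Nat := (PySem.Int.mod u ((2:Int)^(k+1))).toNat with hm
    have hmcast : (m : Int) = u % ((2:Int)^k * 2) := by
      rw [hm, hmodeq]; exact Int.toNat_of_nonneg (Int.emod_nonneg u (by positivity))
    have hdiv : ((m / 2 : Nat) : Int) = (u / 2) % ((2:Int)^k) := by
      have h4 := emod_two_mul_ediv_two u ((2:Int)^k) hMpos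
      have : ((m:Int)) / 2 = (u / 2) % ((2:Int)^k) := by rw [hmcast]; exact h4
      omega
    have hshift : u >>> (1:Nat) = u / 2 := by
      rw [Int.shiftRight_eq_div_pow]; norm_num
    have hmod2 : ((m % 2 : Nat) : Int) = u % 2 := by
      have : ((m:Int)) % 2 = u % 2 := by
        rw [hmcast]; exact Int.emod_emod_of_dvd u ⟨(2:Int)^k, by ring⟩
      omega
    have hband : PySem.Int.band u 1 = u % 2 := by
      rw [PySem.Int.band_one, PySem.Int.mod_eq_emod_of_pos (by norm_num)]
    have hu2 : 0 ≤ u % 2 ∧ u % 2 < 2 := ⟨Int.emod_nonneg u (by norm_num), Int.emod_lt_of_pos u (by norm_num)⟩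
    rw [pvBits, List.reverse_cons, ih (u >>> (1:Nat)), fmt_step, List.map_append]
    congr 1
    · rw [hshift, PySem.Int.mod_eq_emod_of_pos hMpos]
      congr 2
      omega
    · simp only [List.map_cons, List.map_nil]
      by_cases hb : u % 2 = 1
      · have h1 : m % 2 = 1 := by omega
        have hbn : PySem.Int.band u 1 ≠ 0 := by rw [hband]; omega
        simp [h1, hbn]
      · have h1 : ¬ m % 2 = 1 := by omega
        have hbn : ¬ PySem.Int.band u 1 ≠ 0 := by rw [hband]; omega
        simp [h1, hbn]

lemma row_eq (k : Nat) (u : Int) :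
    PySem.Str.join "" (pvInnerA k u []).reverse
      = PySem.Str.replace (PySem.Str.replace
          (String.ofList (pvFormatBin k (PySem.Int.mod u ((1:Int) <<< k)).toNat)) "1" "#") "0" " " := by
  apply String.ext
  rw [PySem.Str.toList_replace, PySem.Str.toList_replace]
  have hmask : ((1:Int) <<< k) = (2:Int)^k := by rw [Int.shiftLeft_eq]; ring
  rw [pvInnerA_eq, List.nil_append, ← List.map_reverse]
  have hj : (PySem.Str.join "" ((pvBits k u).reverse.map (fun c => String.ofList [c]))).toList
      = PySem.Chars.join [] (((pvBits k u).reverse.map (fun c => String.ofList [c])).map String.toList) := by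
    simp [PySem.Str.toList_join]
  rw [hj, List.map_map]
  have : ((fun s => String.toList s) ∘ fun c => String.ofList [c]) = (fun c => [c]) := by
    funext c; simp
  rw [this, PySem.Chars.join_nil_singletons, bits_eq k u, hmask]
  have hmk : (String.ofList (pvFormatBin k (PySem.Int.mod u ((2:Int)^k)).toNat)).toList
      = pvFormatBin k (PySem.Int.mod u ((2:Int)^k)).toNat := by simp
  rw [hmk, show ("1".toList) = ['1'] from rfl, show ("#".toList) = ['#'] from rfl,
    show ("0".toList) = ['0'] from rfl, show (" ".toList) = [' '] from rfl,
    replace_single, replace_single, List.map_map]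
  congr 1
  funext x
  by_cases h1 : x = '1'
  · subst h1; simp
  · by_cases h0 : x = '0'
    · subst h0; simp
    · simp [h1, h0]

-- ===== VERDICT (by name: the statement is the Claim_ definition above) =====
theorem solution_spec : Claim_equal_solution := by
  intro n arr1 arr2 _ _
  unfold Spec_solution solution solution_alt
  rw [PySem.List.foldl_append_singleton_eq_map, List.nil_append]
  exact List.map_congr_left fun i _ => row_eq n.toNat _
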